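-- pv_equiv track=rewrite | github.com/AbdooOwd/dzlink-64 | tools/new_actor/new_actor.py | convertActorNames
-- ===== SOURCE A (Python) =====
-- def convertActorNames(name: str):
--     actorName = ""
--     actorFolderName = "ovl_"
--     actorFilename = "dz"
--     actorEnumID = ""
--
--     split_name = name.split("_")
--
--     for (i, part) in enumerate(split_name):
--         if (i == 0) and (len(split_name) > 1):
--             actorFolderName += part.capitalize() + "_"
--         else:
--             actorFolderName += part.capitalize()
--         actorName += part.capitalize()
--         actorFilename += "_" + part.lower()
--
--     actorEnumID = "ACTOR_" + actorFolderName.replace("ovl_", "").upper()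
--
--     return dict(
--         actorName = actorName,
--         actorFolderName = actorFolderName,
--         actorFilename = actorFilename,
--         actorEnumID = actorEnumID
--     )
-- ===== SOURCE B (Python) =====
-- def convertActorNames(name: str):
--     # Character-level state machine: no split(); one pass over the raw string.
--     actorName = ""
--     folderMid = ""          # what follows "ovl_" in the folder name
--     seen_us = False         # first underscore is kept in the folder name, later ones dropped
--     word_start = True       # next non-underscore char starts a word (capitalize it)
--     for c in name:
--         if c == "_":
--             if not seen_us:
--                 folderMid += "_"
--                 seen_us = True
--             word_start = True
--         else:
--             m = c.upper() if word_start else c.lower()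
--             actorName += m
--             folderMid += m
--             word_start = False
--     actorFolderName = "ovl_" + folderMid
--     actorFilename = "dz_" + name.lower()
--     actorEnumID = "ACTOR_" + actorFolderName.replace("ovl_", "").upper()
--     return dict(
--         actorName=actorName,
--         actorFolderName=actorFolderName,
--         actorFilename=actorFilename,
--         actorEnumID=actorEnumID,
--     )
-- ===== Notes on version B (the rewrite author's own statement) =====
-- stated objective: alternative
-- what changed: Replaces A's split on underscores plus a part-level loop threading three accumulators with a split-free character-level state machine over the raw string (word-start and first-underscore flags), deriving the filename directly by lowercasing the whole name.
import Mathlib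
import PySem

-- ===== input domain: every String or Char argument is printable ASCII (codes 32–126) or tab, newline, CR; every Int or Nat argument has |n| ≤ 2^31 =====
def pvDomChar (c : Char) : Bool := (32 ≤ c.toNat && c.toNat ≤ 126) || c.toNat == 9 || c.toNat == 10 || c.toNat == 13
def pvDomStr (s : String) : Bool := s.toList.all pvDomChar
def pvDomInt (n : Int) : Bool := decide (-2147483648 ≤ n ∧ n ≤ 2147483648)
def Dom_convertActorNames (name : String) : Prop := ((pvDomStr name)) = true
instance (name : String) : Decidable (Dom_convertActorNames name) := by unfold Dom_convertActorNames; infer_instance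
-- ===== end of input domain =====

-- B replaces A's split('_') + part-level accumulator loop by a split-free character-level
-- state machine over the raw string (alternative decomposition; same cost).

-- shared helper: Python's str.capitalize (exact on ASCII: first char upper, rest lower)
def pyCap (cs : List Char) : List Char :=
  match cs with
  | [] => []
  | c :: r => PySem.Chars.upperChar c :: PySem.Chars.lower r

-- ===== PORT A =====
-- loop body of A's for-loop over enumerate(split_name); state = (actorName, actorFolderName, actorFilename)
def aStep (many : Bool) (st : List Char × List Char × List Char) (ip : Int × List Char) :
    List Char × List Char × List Char :=
  let folder := if ip.1 == 0 && many then st.2.1 ++ pyCap ip.2 ++ ['_'] else st.2.1 ++ pyCap ip.2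
  (st.1 ++ pyCap ip.2, folder, st.2.2 ++ '_' :: PySem.Chars.lower ip.2)

def convertActorNames (name : String) : List (String × String) :=
  let split_name := PySem.Chars.splitOn name.toList ['_']
  let st := (PySem.List.enumerate split_name 0).foldl
      (aStep (decide (split_name.length > 1))) ([], "ovl_".toList, "dz".toList)
  let actorEnumID := "ACTOR_".toList ++ PySem.Chars.upper (PySem.Chars.replace st.2.1 "ovl_".toList [])
  [("actorName", String.ofList st.1), ("actorFolderName", String.ofList st.2.1),
   ("actorFilename", String.ofList st.2.2), ("actorEnumID", String.ofList actorEnumID)]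

-- ===== PORT B =====
-- loop body of B's for-loop over the characters of name;
-- state = (actorName, folderMid, seen_us, word_start)
def bStep (st : List Char × List Char × Bool × Bool) (c : Char) :
    List Char × List Char × Bool × Bool :=
  if c == '_' then
    (st.1, if !st.2.2.1 then st.2.1 ++ ['_'] else st.2.1, true, true)
  else
    let m := if st.2.2.2 then PySem.Chars.upperChar c else PySem.Chars.lowerChar c
    (st.1 ++ [m], st.2.1 ++ [m], st.2.2.1, false)

def convertActorNames_alt (name : String) : List (String × String) :=
  let st := name.toList.foldl bStep ([], [], false, true)
  let actorFolderName := "ovl_".toList ++ st.2.1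
  let actorFilename := "dz_".toList ++ PySem.Chars.lower name.toList
  let actorEnumID := "ACTOR_".toList ++ PySem.Chars.upper (PySem.Chars.replace actorFolderName "ovl_".toList [])
  [("actorName", String.ofList st.1), ("actorFolderName", String.ofList actorFolderName),
   ("actorFilename", String.ofList actorFilename), ("actorEnumID", String.ofList actorEnumID)]

-- ===== PRECONDITION & SPEC =====
def Spec_convertActorNames (name : String) (out : List (String × String)) : Prop := out = convertActorNames_alt name
instance (name : String) (out : List (String × String)) : Decidable (Spec_convertActorNames name out) := by unfold Spec_convertActorNames; infer_instance

-- ===== CLAIM =====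
def Claim_equal_convertActorNames : Prop := ∀ (name : String), Dom_convertActorNames name → Spec_convertActorNames name (convertActorNames name)

-- ===== LEMMAS AND PROOFS =====

-- structural model of A's name.split("_")
def splitList : List Char → List Char → List (List Char)
  | [], cur => [cur.reverse]
  | c :: rest, cur => if c = '_' then cur.reverse :: splitList rest [] else splitList rest (c :: cur)

lemma splitList_us (rest cur : List Char) :
    splitList ('_' :: rest) cur = cur.reverse :: splitList rest [] := by simp [splitList]

lemma splitList_ch (c : Char) (rest cur : List Char) (hc : c ≠ '_') :
    splitList (c :: rest) cur = splitList rest (c :: cur) := by simp [splitList, hc]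

lemma splitOn_go_eq : ∀ (fuel : Nat) (l cur : List Char) (acc : List (List Char)),
    l.length ≤ fuel →
    PySem.Chars.splitOn.go ['_'] fuel l cur acc = acc.reverse ++ splitList l cur := by
  intro fuel
  induction fuel with
  | zero =>
    intro l cur acc h
    have : l = [] := by cases l <;> simp_all
    subst this
    simp [PySem.Chars.splitOn.go, splitList]
  | succ n ih =>
    intro l cur acc h
    cases l with
    | nil => simp [PySem.Chars.splitOn.go, splitList]
    | cons c rest =>
      by_cases hc : c = '_'
      · subst hc
        rw [PySem.Chars.splitOn.go]
        rw [if_pos (by simp [List.isPrefixOf])]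
        simp only [List.length_singleton, List.drop_one, List.tail_cons]
        rw [ih rest [] _ (by simp at h; omega)]
        rw [splitList_us]
        simp
      · rw [PySem.Chars.splitOn.go]
        rw [if_neg (by simp [List.isPrefixOf]; intro h'; exact hc h'.symm)]
        rw [ih rest (c :: cur) acc (by simp at h; omega)]
        rw [splitList_ch c rest cur hc]

lemma splitOn_eq (l : List Char) : PySem.Chars.splitOn l ['_'] = splitList l [] := by
  rw [PySem.Chars.splitOn, splitOn_go_eq (l.length + 1) l [] [] (by omega)]
  simp

lemma splitList_ne_nil : ∀ (l cur : List Char), splitList l cur ≠ [] := by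
  intro l
  induction l with
  | nil => intro cur; simp [splitList]
  | cons c rest ih => intro cur; by_cases hc : c = '_' <;> simp [splitList, hc, ih]

-- reconstruction: the original string is head-part ++ ('_'::part) blocks
def joinU : List (List Char) → List Char
  | [] => []
  | p :: ps => p ++ (ps.map (fun q => '_' :: q)).flatten

lemma joinU_cons_of_ne_nil (ps : List (List Char)) (h : ps ≠ []) :
    (ps.map (fun q => '_' :: q)).flatten = '_' :: joinU ps := by
  cases ps with
  | nil => exact absurd rfl h
  | cons p qs => simp [joinU]

lemma joinU_splitList : ∀ (l cur : List Char), joinU (splitList l cur) = cur.reverse ++ l := by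
  intro l
  induction l with
  | nil => intro cur; simp [splitList, joinU]
  | cons c rest ih =>
    intro cur
    by_cases hc : c = '_'
    · subst hc
      rw [splitList_us]
      simp only [joinU]
      rw [joinU_cons_of_ne_nil _ (splitList_ne_nil rest [])]
      have h2 := ih []
      simp only [List.reverse_nil, List.nil_append] at h2
      rw [h2]
    · rw [splitList_ch c rest cur hc, ih (c :: cur)]
      simp

lemma splitList_no_us : ∀ (l cur : List Char), (∀ x ∈ cur, x ≠ '_') →
    ∀ p ∈ splitList l cur, ∀ x ∈ p, x ≠ '_' := by
  intro l
  induction l with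
  | nil =>
    intro cur hcur p hp
    simp [splitList] at hp
    subst hp
    intro x hx; exact hcur x (by simpa using hx)
  | cons c rest ih =>
    intro cur hcur p hp
    by_cases hc : c = '_'
    · subst hc
      rw [splitList_us] at hp
      rcases List.mem_cons.mp hp with hp | hp
      · subst hp; intro x hx; exact hcur x (by simpa using hx)
      · exact ih [] (by simp) p hp
    · rw [splitList_ch c rest cur hc] at hp
      refine ih (c :: cur) ?_ p hp
      intro x hx
      rcases List.mem_cons.mp hx with h | h
      · subst h; exact hc
      · exact hcur x h

-- ===== A-side: the loop after index 0 =====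
lemma aStep_tail (many : Bool) :
    ∀ (l : List (List Char)) (j : Int), 1 ≤ j → ∀ (a b c : List Char),
      (PySem.List.enumerate l j).foldl (aStep many) (a, b, c) =
        (a ++ (l.map pyCap).flatten, b ++ (l.map pyCap).flatten,
         c ++ (l.map (fun p => '_' :: PySem.Chars.lower p)).flatten) := by
  intro l
  induction l with
  | nil => intro j hj a b c; simp [PySem.List.enumerate_nil]
  | cons x xs ih =>
    intro j hj a b c
    have hj0 : (j == 0) = false := by simp; omega
    rw [PySem.List.enumerate_cons, List.foldl_cons]
    simp only [aStep, hj0, Bool.false_and]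
    rw [ih (j + 1) (by omega)]
    simp

-- ===== B-side: the machine over a '_'-free block =====
lemma bRun_false (p : List Char) (hus : ∀ x ∈ p, x ≠ '_') :
    ∀ (a f : List Char) (s : Bool),
      p.foldl bStep (a, f, s, false) = (a ++ PySem.Chars.lower p, f ++ PySem.Chars.lower p, s, false) := by
  induction p with
  | nil => intro a f s; simp [PySem.Chars.lower]
  | cons c r ih =>
    intro a f s
    have hc : (c == '_') = false := by simpa using hus c (by simp)
    rw [List.foldl_cons]
    simp only [bStep, hc, if_false, Bool.false_eq_true]
    rw [ih (fun x hx => hus x (by simp [hx])) _ _ s]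
    simp [PySem.Chars.lower]

lemma bRun_true (p : List Char) (hus : ∀ x ∈ p, x ≠ '_') (a f : List Char) (s : Bool) :
    p.foldl bStep (a, f, s, true) = (a ++ pyCap p, f ++ pyCap p, s, p.isEmpty) := by
  cases p with
  | nil => simp [pyCap]
  | cons c r =>
    have hc : (c == '_') = false := by simpa using hus c (by simp)
    rw [List.foldl_cons]
    simp only [bStep, hc, if_false, Bool.false_eq_true, if_true]
    rw [bRun_false r (fun x hx => hus x (by simp [hx])) _ _ s]
    simp [pyCap]

-- B-side: the remaining ('_' :: part) blocks once the first underscore was seen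
lemma bRun_blocks : ∀ (ps : List (List Char)), (∀ p ∈ ps, ∀ x ∈ p, x ≠ '_') →
    ∀ (a f : List Char) (w : Bool), ∃ w',
      ((ps.map (fun q => '_' :: q)).flatten).foldl bStep (a, f, true, w) =
        (a ++ (ps.map pyCap).flatten, f ++ (ps.map pyCap).flatten, true, w') := by
  intro ps
  induction ps with
  | nil => intro _ a f w; exact ⟨w, by simp⟩
  | cons p qs ih =>
    intro h a f w
    simp only [List.map_cons, List.flatten_cons, List.foldl_append, List.foldl_cons]
    have hstep : bStep (a, f, true, w) '_' = (a, f, true, true) := by simp [bStep]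
    rw [hstep, bRun_true p (h p (by simp)) a f true]
    obtain ⟨w', hw⟩ := ih (fun q hq => h q (by simp [hq])) (a ++ pyCap p) (f ++ pyCap p) p.isEmpty
    exact ⟨w', by rw [hw]; simp⟩

lemma lowerChar_us : PySem.Chars.lowerChar '_' = '_' := by decide

-- ===== VERDICT =====
theorem convertActorNames_spec : Claim_equal_convertActorNames := by
  intro name _
  simp only [Spec_convertActorNames, convertActorNames, convertActorNames_alt, splitOn_eq]
  have hnn := splitList_ne_nil name.toList []
  have hnus := splitList_no_us name.toList [] (by simp)
  have hrec := joinU_splitList name.toList []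
  cases hp : splitList name.toList [] with
  | nil => exact absurd hp hnn
  | cons p rest =>
    rw [hp] at hrec hnus
    simp only [List.reverse_nil, List.nil_append, joinU] at hrec
    have hname : name.toList = p ++ (rest.map (fun q => '_' :: q)).flatten := hrec.symm
    rw [hname, PySem.List.enumerate_cons, List.foldl_cons]
    cases rest with
    | nil =>
      simp only [aStep, PySem.List.enumerate_nil, List.foldl_nil, List.map_nil,
        List.flatten_nil, List.append_nil, List.foldl_nil]
      rw [bRun_true p (hnus p (by simp)) [] [] false]
      simp [PySem.Chars.lower]
    | cons r rs =>
      rw [aStep_tail _ (r :: rs) (0 + 1) (by norm_num)]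
      simp only [aStep]
      rw [List.foldl_append, bRun_true p (hnus p (by simp)) [] [] false]
      have hfirst : bStep (pyCap p, pyCap p, false, p.isEmpty) '_' =
          (pyCap p, pyCap p ++ ['_'], true, true) := by simp [bStep]
      simp only [List.map_cons, List.flatten_cons, List.cons_append, List.foldl_cons,
        List.nil_append, hfirst]
      rw [List.foldl_append, bRun_true r (hnus r (by simp)) _ _ true]
      obtain ⟨w', hw⟩ := bRun_blocks rs (fun q hq => hnus q (by simp [hq]))
        (pyCap p ++ pyCap r) (pyCap p ++ ['_'] ++ pyCap r) r.isEmpty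
      rw [hw]
      have hmaps : List.map (List.map PySem.Chars.lowerChar ∘ fun q => '_' :: q) rs
          = List.map (fun q => '_' :: List.map PySem.Chars.lowerChar q) rs := by
        apply List.map_congr_left
        intro q _
        simp [lowerChar_us]
      simp [PySem.Chars.lower, lowerChar_us, hmaps]
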